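-- pv_equiv track=rewrite | github.com/Jmcgee01125/ObsidiaMC-Discord-Console | bot/helpers/embedhelper.py | escape_ctrl_chars
-- ===== SOURCE A (Python) =====
-- from typing import Union
--
-- def escape_ctrl_chars(text: Union[str, None]) -> Union[str, None]:
--     '''
--     Returns the provided text with any control characters prepended by a backslash
--
--     If an nextcord.Embed.Empty or None is passed, returns unchanged
--     '''
--     if text == None:
--         return text
--     text = str(text)
--     control_characters = ["*", "_", "~", "`", "|", ">"]
--     escaped_str = ""
--     for c in text:
--         if c in control_characters:
--             escaped_str += f"\\{c}"
--         else:
--             escaped_str += c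
--     return escaped_str
-- ===== SOURCE B (Python) =====
-- def escape_ctrl_chars(text):
--     '''
--     Returns the provided text with any control characters prepended by a backslash
--
--     If an nextcord.Embed.Empty or None is passed, returns unchanged
--     '''
--     if text == None:
--         return text
--     text = str(text)
--     for c in "*_~`|>":
--         text = text.replace(c, "\\" + c)
--     return text
-- ===== Notes on version B (the rewrite author's own statement) =====
-- stated objective: faster
-- what changed: Replaces A's single char-by-char pass (membership test plus repeated string concatenation) by six staged whole-string str.replace passes, one per control character; correct because the inserted backslash is not itself a control character, so later passes never touch earlier insertions.
import Mathlib
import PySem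

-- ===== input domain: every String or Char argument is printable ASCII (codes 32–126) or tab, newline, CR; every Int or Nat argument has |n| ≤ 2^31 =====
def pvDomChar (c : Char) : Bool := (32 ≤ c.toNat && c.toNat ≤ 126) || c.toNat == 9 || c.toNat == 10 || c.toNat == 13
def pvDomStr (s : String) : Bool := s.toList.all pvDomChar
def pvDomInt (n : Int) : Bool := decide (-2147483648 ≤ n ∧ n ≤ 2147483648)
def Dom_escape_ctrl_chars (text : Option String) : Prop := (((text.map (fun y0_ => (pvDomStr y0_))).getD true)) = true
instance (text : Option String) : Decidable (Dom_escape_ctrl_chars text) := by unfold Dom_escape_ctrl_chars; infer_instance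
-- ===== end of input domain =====

-- ===== PORT A =====
-- B replaces A's single char-by-char pass (membership test + concatenation) by six
-- staged whole-string str.replace passes, one per control character; same values.
def escape_ctrl_chars (text : Option String) : Option String :=
  match text with
  | none => none
  | some t =>
    let control_characters : List Char := ['*', '_', '~', '`', '|', '>']
    some (String.ofList (t.toList.foldl
      (fun acc c => acc ++ (if c ∈ control_characters then ['\\', c] else [c])) []))

-- ===== PORT B =====
-- for c in "*_~`|>": text = text.replace(c, "\\" + c)
def escape_ctrl_chars_alt (text : Option String) : Option String :=
  match text with
  | none => none
  | some t =>
    some ("*_~`|>".toList.foldl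
      (fun s c => PySem.Str.replace s (String.ofList [c]) (String.ofList ['\\', c])) t)

-- ===== PRECONDITION & SPEC =====
def Spec_escape_ctrl_chars (text : Option String) (out : Option String) : Prop := out = escape_ctrl_chars_alt text
instance (text : Option String) (out : Option String) : Decidable (Spec_escape_ctrl_chars text out) := by unfold Spec_escape_ctrl_chars; infer_instance

-- ===== CLAIM (what is proved, stated in full; the proofs are below) =====
def Claim_equal_escape_ctrl_chars : Prop := ∀ (text : Option String), Dom_escape_ctrl_chars text → Spec_escape_ctrl_chars text (escape_ctrl_chars text)

-- ===== LEMMAS AND PROOFS =====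

-- single-character replace is a per-character flatMap
theorem go_single (c : Char) (new : List Char) :
    ∀ (l acc : List Char) (fuel : Nat), l.length ≤ fuel →
      PySem.Chars.replace.go [c] new fuel l acc
        = acc.reverse ++ l.flatMap (fun x => if x = c then new else [x]) := by
  intro l
  induction l with
  | nil =>
    intro acc fuel _
    cases fuel <;> simp [PySem.Chars.replace.go]
  | cons x t ih =>
    intro acc fuel hfuel
    cases fuel with
    | zero => simp at hfuel
    | succ f =>
      have hf : t.length ≤ f := by simpa using hfuel
      by_cases hx : c = x
      · subst hx
        have hp : List.isPrefixOf [c] (c :: t) = true := by simp [List.isPrefixOf]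
        simp [PySem.Chars.replace.go, hp, ih _ f hf]
      · have hp : List.isPrefixOf [c] (x :: t) = false := by
          simp [List.isPrefixOf, hx]
        simp [PySem.Chars.replace.go, hp, ih _ f hf, Ne.symm hx]

theorem replace_single (c : Char) (new l : List Char) :
    PySem.Chars.replace l [c] new = l.flatMap (fun x => if x = c then new else [x]) := by
  simp [PySem.Chars.replace, go_single c new l [] l.length (le_refl _)]

-- abbreviation for one escaping pass on char lists
def pvPass (c : Char) (l : List Char) : List Char :=
  l.flatMap (fun x => if x = c then ['\\', c] else [x])

def passAll (l : List Char) : List Char :=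
  "*_~`|>".toList.foldl (fun s c => pvPass c s) l

theorem pvPass_append (c : Char) (a b : List Char) :
    pvPass c (a ++ b) = pvPass c a ++ pvPass c b := by
  simp [pvPass]

theorem passAll_append (a b : List Char) :
    passAll (a ++ b) = passAll a ++ passAll b := by
  simp [passAll, List.foldl, pvPass_append]

-- on a single character the six staged passes compute A's per-character step
theorem passAll_single (x : Char) :
    passAll [x] = (if x ∈ (['*', '_', '~', '`', '|', '>'] : List Char) then ['\\', x] else [x]) := by
  by_cases h1 : x = '*'; · subst h1; decide
  by_cases h2 : x = '_'; · subst h2; decide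
  by_cases h3 : x = '~'; · subst h3; decide
  by_cases h4 : x = '`'; · subst h4; decide
  by_cases h5 : x = '|'; · subst h5; decide
  by_cases h6 : x = '>'; · subst h6; decide
  simp [passAll, pvPass, h1, h2, h3, h4, h5, h6]

theorem passAll_eq (l : List Char) :
    passAll l
      = l.flatMap (fun x => if x ∈ (['*', '_', '~', '`', '|', '>'] : List Char) then ['\\', x] else [x]) := by
  induction l with
  | nil => decide
  | cons x t ih =>
    have h : (x :: t) = [x] ++ t := rfl
    rw [h, passAll_append, ih, passAll_single]
    simp

-- B's String-level fold, viewed through toList, is passAll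
theorem alt_toList (t : String) :
    ("*_~`|>".toList.foldl
        (fun s c => PySem.Str.replace s (String.ofList [c]) (String.ofList ['\\', c])) t).toList
      = passAll t.toList := by
  simp only [passAll]
  have h : ∀ (cs : List Char) (s : String),
      (cs.foldl (fun s c => PySem.Str.replace s (String.ofList [c]) (String.ofList ['\\', c])) s).toList
        = cs.foldl (fun l c => pvPass c l) s.toList := by
    intro cs
    induction cs with
    | nil => intro s; rfl
    | cons c cs ih =>
      intro s
      simp only [List.foldl]
      rw [ih, PySem.Str.toList_replace]
      simp [replace_single, pvPass]
  exact h _ t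

-- ===== VERDICT (by name: the statement is the Claim_ definition above) =====
theorem escape_ctrl_chars_spec : Claim_equal_escape_ctrl_chars := by
  intro text _
  unfold Spec_escape_ctrl_chars
  cases text with
  | none => rfl
  | some t =>
    simp only [escape_ctrl_chars, escape_ctrl_chars_alt, Option.some.injEq]
    apply String.ext
    rw [alt_toList, passAll_eq]
    simp [List.flatMap]
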